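-- pv_equiv track=rewrite | github.com/wyk18703232953/myResearch | codeComplex/data/filteredData/python/linear/python_linear_0132.py | preprocess_f
-- ===== SOURCE A (Python) =====
-- def preprocess_f(maxnum):
--     f = [0] * maxnum
--
--     def cntone(num):
--         return bin(num).count('1')
--
--     for i in range(1, maxnum):
--         if i == 1:
--             f[i] = 0
--         else:
--             f[i] = f[cntone(i)] + 1
--     return f
-- ===== SOURCE B (Python) =====
-- def preprocess_f(maxnum):
--     # Compute each entry independently: f[i] is the number of times you must
--     # replace i by its popcount to reach 1 (0 for i < 2); no memo table needed.
--     out = []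
--     for i in range(maxnum):
--         if i < 2:
--             out.append(0)
--         else:
--             steps, n = 0, i
--             while n != 1:
--                 n = bin(n).count('1')
--                 steps += 1
--             out.append(steps)
--     return out
-- ===== Notes on version B (the rewrite author's own statement) =====
-- stated objective: alternative
-- what changed: A fills a memo array using the recurrence f[i]=f[popcount(i)]+1 with lookups into earlier entries; B computes each entry independently by iterating n -> popcount(n) until reaching 1 and counting the steps, so no table of previous results is read
import Mathlib
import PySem

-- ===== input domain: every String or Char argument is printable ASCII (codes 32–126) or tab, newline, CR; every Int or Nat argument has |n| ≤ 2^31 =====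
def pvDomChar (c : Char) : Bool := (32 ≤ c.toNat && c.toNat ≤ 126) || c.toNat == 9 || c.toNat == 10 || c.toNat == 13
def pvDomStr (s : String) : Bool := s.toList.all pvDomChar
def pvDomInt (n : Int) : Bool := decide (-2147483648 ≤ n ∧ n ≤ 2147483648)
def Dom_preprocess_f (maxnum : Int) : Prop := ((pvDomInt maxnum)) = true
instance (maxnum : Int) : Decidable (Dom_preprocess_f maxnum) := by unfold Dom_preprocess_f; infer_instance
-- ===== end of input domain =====

-- B computes each entry independently by iterating n -> popcount(n) until 1 and counting steps, instead of A's memo-table recurrence f[i]=f[popcount(i)]+1.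


-- ===== PORT A =====
-- cntone(num) = bin(num).count('1')  (used verbatim by both Pythons)
def pvCntone (num : Int) : Int := (PySem.Str.count (PySem.Int.pyBin num) "1" : Int)

def preprocess_f (maxnum : Int) : List Int :=
  (PySem.List.pyRange 1 maxnum 1).foldl
    (fun f i =>
      if i = 1 then PySem.List.pySetD f i 0
      else PySem.List.pySetD f i (PySem.List.pyGetD f (pvCntone i) 0 + 1))
    (List.replicate maxnum.toNat 0)

-- ===== PORT B =====
-- Lemmas cited by pvLoop's decreasing_by: bin(n).count('1') = popcount n, and popcount n < n for n ≥ 2.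

theorem pv_count_go_singleton (c : Char) : ∀ (l : List Char) (fuel acc : Nat),
    l.length ≤ fuel → PySem.Chars.count.go [c] fuel l acc = acc + l.count c := by
  intro l
  induction l with
  | nil => intro fuel acc _; cases fuel <;> simp [PySem.Chars.count.go]
  | cons h t ih =>
    intro fuel acc hf
    cases fuel with
    | zero => simp at hf
    | succ fuel =>
      by_cases hc : h = c
      · subst hc
        rw [show PySem.Chars.count.go [h] (fuel+1) (h :: t) acc
              = PySem.Chars.count.go [h] fuel t (acc + 1) by
            simp [PySem.Chars.count.go, List.isPrefixOf]]
        rw [ih fuel (acc+1) (by simpa using hf)]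
        simp; omega
      · rw [show PySem.Chars.count.go [c] (fuel+1) (h :: t) acc
              = PySem.Chars.count.go [c] fuel t acc by
            simp [PySem.Chars.count.go, List.isPrefixOf]
            intro h'; exact absurd h'.symm hc]
        rw [ih fuel acc (by simpa using hf)]
        simp [hc]

theorem pv_chars_count_singleton (l : List Char) (c : Char) :
    PySem.Chars.count l [c] = l.count c := by
  simp [PySem.Chars.count, pv_count_go_singleton c l l.length 0 le_rfl]

theorem pv_toDigitsCore_count : ∀ (fuel n : Nat) (l : List Char), n < 2 ^ fuel →
    (Nat.toDigitsCore 2 fuel n l).count '1' = PySem.Int.bitCount (n : Int) + l.count '1' := by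
  intro fuel
  induction fuel with
  | zero => intro n l h; interval_cases n; simp [Nat.toDigitsCore]
  | succ fuel ih =>
    intro n l h
    by_cases h2 : n < 2
    · have hd0 : Nat.digitChar 0 = '0' := rfl
      have hd1 : Nat.digitChar 1 = '1' := rfl
      interval_cases n
      · rw [show Nat.toDigitsCore 2 (fuel + 1) 0 l = '0' :: l by
            simp [Nat.toDigitsCore, hd0]]
        rw [List.count_cons]
        simp
      · rw [show Nat.toDigitsCore 2 (fuel + 1) 1 l = '1' :: l by
            simp [Nat.toDigitsCore, hd1]]
        rw [List.count_cons]
        rw [show PySem.Int.bitCount ((1 : Nat) : Int) = 1 from rfl]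
        simp
        omega
    · rw [show Nat.toDigitsCore 2 (fuel+1) n l
            = Nat.toDigitsCore 2 fuel (n / 2) (Nat.digitChar (n % 2) :: l) by
          simp [Nat.toDigitsCore, h2]]
      rw [ih (n / 2) _ (by omega)]
      rw [PySem.Int.bitCount_natCast (by omega : 0 < n)]
      have hd0 : Nat.digitChar 0 = '0' := rfl
      have hd1 : Nat.digitChar 1 = '1' := rfl
      have hm : n % 2 = 0 ∨ n % 2 = 1 := by omega
      rcases hm with hm | hm
      · rw [hm, hd0, List.count_cons]
        simp
      · rw [hm, hd1, List.count_cons]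
        simp
        omega

theorem pv_toDigits_count (m : Nat) :
    (Nat.toDigits 2 m).count '1' = PySem.Int.bitCount (m : Int) := by
  have := pv_toDigitsCore_count (m + 1) m []
    (by exact Nat.lt_two_pow_self.trans_le (Nat.pow_le_pow_right (by norm_num) (by omega)))
  simpa [Nat.toDigits] using this

theorem pvCntone_eq (i : Int) (h : 0 ≤ i) :
    pvCntone i = (PySem.Int.bitCount ((i.toNat : Nat) : Int) : Int) := by
  unfold pvCntone
  rw [PySem.Str.count_eq, PySem.Int.toList_pyBin]
  rw [show ("1" : String).toList = ['1'] from rfl]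
  unfold PySem.Int.toBinChars0b
  rw [if_neg (by omega)]
  rw [pv_chars_count_singleton]
  simp [pv_toDigits_count i.toNat, Int.toNat_of_nonneg h]

theorem pv_bitCount_lt : ∀ m : Nat, 2 ≤ m → PySem.Int.bitCount (m : Int) < m := by
  intro m
  induction m using Nat.strong_induction_on with
  | _ m ih =>
    intro h
    by_cases h4 : m ≤ 3
    · interval_cases m <;> decide
    · rw [PySem.Int.bitCount_natCast (by omega)]
      have := ih (m / 2) (by omega) (by omega)
      omega

theorem pvCntone_toNat_lt (n : Int) (h : 2 ≤ n) : (pvCntone n).toNat < n.toNat := by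
  rw [pvCntone_eq n (by omega)]
  have := pv_bitCount_lt n.toNat (by omega)
  omega

-- the while loop of B: 'while n != 1: n = bin(n).count("1"); steps += 1'
-- (Python only enters it with n ≥ 2; the n ≤ 0 guard totalizes the recursion)
def pvLoop (n steps : Int) : Int :=
  if n = 1 then steps
  else if n ≤ 0 then steps
  else pvLoop (pvCntone n) (steps + 1)
termination_by n.toNat
decreasing_by exact pvCntone_toNat_lt n (by omega)

def preprocess_f_alt (maxnum : Int) : List Int :=
  (PySem.List.pyRange 0 maxnum 1).foldl
    (fun out i => out ++ [if i < 2 then (0 : Int) else pvLoop i 0]) []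

-- ===== PRECONDITION & SPEC =====
def Spec_preprocess_f (maxnum : Int) (out : List Int) : Prop := out = preprocess_f_alt maxnum
instance (maxnum : Int) (out : List Int) : Decidable (Spec_preprocess_f maxnum out) := by unfold Spec_preprocess_f; infer_instance

-- ===== CLAIM =====
def Claim_equal_preprocess_f : Prop := ∀ (maxnum : Int), Dom_preprocess_f maxnum → Spec_preprocess_f maxnum (preprocess_f maxnum)

-- ===== LEMMAS AND PROOFS =====

theorem pv_bitCount_pos : ∀ m : Nat, 1 ≤ m → 1 ≤ PySem.Int.bitCount (m : Int) := by
  intro m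
  induction m using Nat.strong_induction_on with
  | _ m ih =>
    intro h
    by_cases h2 : m ≤ 1
    · interval_cases m; decide
    · rw [PySem.Int.bitCount_natCast (by omega)]
      have := ih (m / 2) (by omega) (by omega)
      omega

def pvG (j : Nat) : Int := pvLoop (j : Int) 0

theorem pvLoop_one (s : Int) : pvLoop 1 s = s := by
  rw [pvLoop]; simp

theorem pvLoop_nonpos (n s : Int) (h : n ≤ 0) : pvLoop n s = s := by
  rw [pvLoop, if_neg (by omega), if_pos h]

theorem pvLoop_step (n s : Int) (h : 2 ≤ n) : pvLoop n s = pvLoop (pvCntone n) (s + 1) := by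
  rw [pvLoop, if_neg (by omega), if_neg (by omega)]

theorem pvLoop_shift : ∀ (k : Nat) (n s : Int), n.toNat ≤ k → pvLoop n s = pvLoop n 0 + s := by
  intro k
  induction k with
  | zero =>
    intro n s h
    rw [pvLoop_nonpos n s (by omega), pvLoop_nonpos n 0 (by omega)]
    ring
  | succ k ih =>
    intro n s h
    by_cases h1 : n = 1
    · subst h1; rw [pvLoop_one, pvLoop_one]; ring
    · by_cases h0 : n ≤ 0
      · rw [pvLoop_nonpos n s h0, pvLoop_nonpos n 0 h0]; ring
      · have h2 : 2 ≤ n := by omega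
        have hlt := pvCntone_toNat_lt n h2
        rw [pvLoop_step n s h2, pvLoop_step n 0 h2]
        rw [ih (pvCntone n) (s + 1) (by omega), ih (pvCntone n) (0 + 1) (by omega)]
        ring

theorem pvG_step (m : Nat) (h : 2 ≤ m) :
    pvG m = pvG (PySem.Int.bitCount (m : Int)) + 1 := by
  unfold pvG
  rw [pvLoop_step (m : Int) 0 (by exact_mod_cast h)]
  rw [pvCntone_eq (m : Int) (by omega)]
  simp only [Int.toNat_natCast]
  rw [show (0 : Int) + 1 = 1 by ring]
  exact pvLoop_shift _ _ 1 le_rfl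

-- contents of A's array after processing range(1, m)
def pvFSpec (n m : Nat) : List Int :=
  (List.range n).map (fun j => if 2 ≤ j ∧ j < m then pvG j else 0)

theorem pvFSpec_trivial (n m : Nat) (hm : m ≤ 2) :
    pvFSpec n m = List.replicate n 0 := by
  unfold pvFSpec
  rw [List.eq_replicate_iff]
  constructor
  · simp
  · intro b hb
    simp only [List.mem_map] at hb
    obtain ⟨j, _, hj⟩ := hb
    rw [if_neg (by omega)] at hj
    exact hj.symm

theorem pvFSpec_getD (n m j : Nat) (hj : j < n) :
    (pvFSpec n m).getD j 0 = if 2 ≤ j ∧ j < m then pvG j else 0 := by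
  unfold pvFSpec
  rw [List.getD_eq_getElem?_getD]
  simp [hj]

theorem pvFSpec_set (n m : Nat) (h1 : 2 ≤ m) (_hn : m < n) :
    (pvFSpec n m).set m (pvG m) = pvFSpec n (m + 1) := by
  apply List.ext_getElem
  · simp [pvFSpec]
  · intro j hj hj'
    have hjn : j < n := by simpa [pvFSpec] using hj'
    rw [List.getElem_set]
    unfold pvFSpec
    simp only [List.getElem_map, List.getElem_range]
    by_cases hje : m = j
    · subst hje
      rw [if_pos rfl, if_pos (by omega : 2 ≤ m ∧ m < m + 1)]
    · rw [if_neg hje]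
      by_cases hc : 2 ≤ j ∧ j < m
      · rw [if_pos hc, if_pos (by omega : 2 ≤ j ∧ j < m + 1)]
      · rw [if_neg hc, if_neg (by omega : ¬(2 ≤ j ∧ j < m + 1))]

theorem pv_a_fold (n : Nat) : ∀ m : Nat, m ≤ n →
    (PySem.List.pyRange 1 (m : Int) 1).foldl
      (fun f i =>
        if i = 1 then PySem.List.pySetD f i 0
        else PySem.List.pySetD f i (PySem.List.pyGetD f (pvCntone i) 0 + 1))
      (List.replicate n 0) = pvFSpec n m := by
  intro m
  induction m with
  | zero =>
    intro _
    rw [PySem.List.pyRange_one_eq_nil (by norm_num)]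
    rw [pvFSpec_trivial n 0 (by omega)]
    rfl
  | succ m ih =>
    intro hm
    rcases Nat.eq_zero_or_pos m with rfl | hpos
    · rw [show ((0 + 1 : Nat) : Int) = 1 by norm_num,
        PySem.List.pyRange_one_eq_nil le_rfl,
        pvFSpec_trivial n 1 (by omega)]
      rfl
    · rw [show ((m + 1 : Nat) : Int) = (m : Int) + 1 by push_cast; ring,
        PySem.List.pyRange_one_succ_right (by exact_mod_cast hpos),
        List.foldl_append, ih (by omega)]
      simp only [List.foldl_cons, List.foldl_nil]
      rcases Nat.lt_or_ge m 2 with h2 | h2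
      · -- m = 1: the branch sets f[1] = 0, which it already is
        interval_cases m
        simp only [Nat.cast_one]
        rw [if_pos trivial]
        rw [pvFSpec_trivial n 1 (by omega), show (1 + 1 : Nat) = 2 from rfl,
          pvFSpec_trivial n 2 (by omega)]
        rw [show PySem.List.pySetD (List.replicate n (0 : Int)) 1 0
              = (List.replicate n (0 : Int)).set 1 0 by
            exact_mod_cast PySem.List.pySetD_natCast (List.replicate n (0:Int)) 1 0]
        rw [List.set_replicate_self]
      · rw [if_neg (by exact_mod_cast (by omega : (m : Int) ≠ 1))]
        have hc1 : 1 ≤ PySem.Int.bitCount ((m : Nat) : Int) := pv_bitCount_pos m (by omega)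
        have hclt : PySem.Int.bitCount ((m : Nat) : Int) < m := pv_bitCount_lt m h2
        rw [pvCntone_eq (m : Int) (by omega)]
        simp only [Int.toNat_natCast]
        rw [PySem.List.pyGetD_natCast, pvFSpec_getD n m _ (by omega)]
        have hval : (if 2 ≤ PySem.Int.bitCount ((m : Nat) : Int)
              ∧ PySem.Int.bitCount ((m : Nat) : Int) < m
            then pvG (PySem.Int.bitCount ((m : Nat) : Int)) else 0) + 1 = pvG m := by
          rw [pvG_step m h2]
          by_cases hcc : 2 ≤ PySem.Int.bitCount ((m : Nat) : Int)
          · rw [if_pos ⟨hcc, hclt⟩]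
          · have hc1' : PySem.Int.bitCount ((m : Nat) : Int) = 1 := by omega
            rw [if_neg (by omega), hc1']
            have : pvG 1 = 0 := by unfold pvG; rw [pvLoop]; simp
            rw [this]
        rw [hval]
        rw [PySem.List.pySetD_natCast]
        exact pvFSpec_set n m h2 (by omega)

theorem pv_b_fold (n : Nat) :
    (PySem.List.pyRange 0 (n : Int) 1).foldl
      (fun out i => out ++ [if i < 2 then (0 : Int) else pvLoop i 0]) []
    = (List.range n).map (fun (j : Nat) => if (j : Int) < 2 then 0 else pvG j) := by
  induction n with
  | zero => rw [PySem.List.pyRange_one_eq_nil (by norm_num)]; rfl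
  | succ n ih =>
    rw [show ((n + 1 : Nat) : Int) = (n : Int) + 1 by push_cast; ring,
      PySem.List.pyRange_one_succ_right (by positivity),
      List.foldl_append, ih]
    simp only [List.foldl_cons, List.foldl_nil]
    rw [List.range_succ, List.map_append]
    rfl

theorem pv_main (maxnum : Int) : preprocess_f maxnum = preprocess_f_alt maxnum := by
  unfold preprocess_f preprocess_f_alt
  by_cases h0 : maxnum ≤ 0
  · rw [PySem.List.pyRange_one_eq_nil (by omega),
      PySem.List.pyRange_one_eq_nil (by omega)]
    simp [Int.toNat_of_nonpos h0]
  · have hmx : maxnum = (maxnum.toNat : Int) := (Int.toNat_of_nonneg (by omega)).symm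
    rw [hmx]
    simp only [Int.toNat_natCast]
    rw [pv_a_fold maxnum.toNat maxnum.toNat le_rfl, pv_b_fold maxnum.toNat]
    unfold pvFSpec
    apply List.map_congr_left
    intro j hj
    rw [List.mem_range] at hj
    by_cases h2 : 2 ≤ j
    · rw [if_pos ⟨h2, hj⟩, if_neg (by exact_mod_cast (by omega : ¬ (j : Int) < 2))]
    · rw [if_neg (by omega), if_pos (by exact_mod_cast (by omega : (j : Int) < 2))]

-- ===== VERDICT =====
theorem preprocess_f_spec : Claim_equal_preprocess_f := by
  intro maxnum _
  unfold Spec_preprocess_f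
  exact pv_main maxnum
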